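-- pv_equiv track=rewrite | github.com/yimingzhang2026/MARL-multicell | 57device_celluar_network_benchmarks/env_backend.py | find_all_conflict_links
-- ===== SOURCE A (Python) =====
-- def find_all_conflict_links(conflicts, service_pool):
--     # Dictionary to hold all links and their corresponding conflicting links
--     conflict_dict = {}
--
--     # Check each pair to see if the link is part of the pair and add the other element of the pair to the set
--     for a, b in conflicts:
--         if a not in conflict_dict:
--             conflict_dict[a] = set()
--         if b not in conflict_dict:
--             conflict_dict[b] = set()
--
--         conflict_dict[a].add(b)
--         conflict_dict[b].add(a)
--
--     # Convert sets to sorted lists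
--     sorted_keys = sorted(conflict_dict.keys())
--     sorted_conflict_dict = {key: sorted(conflict_dict[key]) for key in sorted_keys}
--
--     return sorted_conflict_dict
-- ===== SOURCE B (Python) =====
-- def find_all_conflict_links(conflicts, service_pool):
--     # Direct comprehension: sorted distinct endpoints as keys, each neighbor
--     # list computed by filtering the conflict list per key.
--     nodes = sorted({x for pair in conflicts for x in pair})
--     return {
--         k: sorted({b for a, b in conflicts if a == k}
--                   | {a for a, b in conflicts if b == k})
--         for k in nodes
--     }
-- ===== Notes on version B (the rewrite author's own statement) =====
-- stated objective: simpler
-- what changed: Replaces the incremental dict-of-mutable-sets build with a direct comprehension: the sorted distinct endpoints become the keys, and each neighbor list is computed independently by filtering the conflict list per key.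
import Mathlib
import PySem

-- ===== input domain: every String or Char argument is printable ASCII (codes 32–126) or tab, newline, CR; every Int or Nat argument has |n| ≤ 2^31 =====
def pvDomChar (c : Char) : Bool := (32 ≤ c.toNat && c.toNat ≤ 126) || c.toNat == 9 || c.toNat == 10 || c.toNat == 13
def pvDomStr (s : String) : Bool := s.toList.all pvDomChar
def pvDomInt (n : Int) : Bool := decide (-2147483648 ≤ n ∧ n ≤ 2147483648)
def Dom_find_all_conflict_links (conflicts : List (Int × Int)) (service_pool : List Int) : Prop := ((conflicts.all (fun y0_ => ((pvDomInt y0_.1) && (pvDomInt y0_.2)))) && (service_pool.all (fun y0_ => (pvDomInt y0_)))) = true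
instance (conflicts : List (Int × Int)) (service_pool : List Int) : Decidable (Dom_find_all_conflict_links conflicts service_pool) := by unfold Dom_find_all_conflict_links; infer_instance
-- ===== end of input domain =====

-- B builds the same dict by a direct per-key comprehension (simpler decomposition), not faster.

-- ===== PORT A =====
def find_all_conflict_links (conflicts : List (Int × Int)) (service_pool : List Int) : List (Int × List Int) :=
  let conflict_dict : PySem.Dict Int (PySem.Set Int) :=
    conflicts.foldl (fun d p =>
      let d := if d.contains p.1 then d else d.insert p.1 PySem.Set.empty
      let d := if d.contains p.2 then d else d.insert p.2 PySem.Set.empty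
      let d := d.insert p.1 (PySem.Set.add (d.getD p.1 PySem.Set.empty) p.2)
      d.insert p.2 (PySem.Set.add (d.getD p.2 PySem.Set.empty) p.1))
      PySem.Dict.empty
  let sorted_keys := PySem.List.sorted conflict_dict.keys (fun x => x) false
  sorted_keys.map (fun key =>
    (key, PySem.List.sorted (conflict_dict.getD key PySem.Set.empty) (fun x => x) false))

-- ===== PORT B =====
def find_all_conflict_links_alt (conflicts : List (Int × Int)) (service_pool : List Int) : List (Int × List Int) :=
  let nodes := PySem.List.sorted
    (PySem.Set.ofList (conflicts.flatMap (fun pair => [pair.1, pair.2]))) (fun x => x) false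
  nodes.map (fun k =>
    (k, PySem.List.sorted
      (PySem.Set.union
        (PySem.Set.ofList ((conflicts.filter (fun p => p.1 == k)).map (fun p => p.2)))
        (PySem.Set.ofList ((conflicts.filter (fun p => p.2 == k)).map (fun p => p.1))))
      (fun x => x) false))

-- ===== PRECONDITION & SPEC =====
def Spec_find_all_conflict_links (conflicts : List (Int × Int)) (service_pool : List Int) (out : List (Int × List Int)) : Prop := out = find_all_conflict_links_alt conflicts service_pool
instance (conflicts : List (Int × Int)) (service_pool : List Int) (out : List (Int × List Int)) : Decidable (Spec_find_all_conflict_links conflicts service_pool out) := by unfold Spec_find_all_conflict_links; infer_instance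

-- ===== CLAIM (what is proved, stated in full; the proofs are below) =====
def Claim_equal_find_all_conflict_links : Prop := ∀ (conflicts : List (Int × Int)) (service_pool : List Int), Dom_find_all_conflict_links conflicts service_pool → Spec_find_all_conflict_links conflicts service_pool (find_all_conflict_links conflicts service_pool)

-- ===== LEMMAS AND PROOFS =====

-- A's loop body, named for the proofs (definitionally the lambda in the port)
def pvStepA (d : PySem.Dict Int (PySem.Set Int)) (p : Int × Int) : PySem.Dict Int (PySem.Set Int) :=
  let d := if d.contains p.1 then d else d.insert p.1 PySem.Set.empty
  let d := if d.contains p.2 then d else d.insert p.2 PySem.Set.empty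
  let d := d.insert p.1 (PySem.Set.add (d.getD p.1 PySem.Set.empty) p.2)
  d.insert p.2 (PySem.Set.add (d.getD p.2 PySem.Set.empty) p.1)

lemma pvA_eq (conflicts : List (Int × Int)) (service_pool : List Int) :
    find_all_conflict_links conflicts service_pool =
      (PySem.List.sorted (conflicts.foldl pvStepA PySem.Dict.empty).keys (fun x => x) false).map
        (fun key => (key, PySem.List.sorted ((conflicts.foldl pvStepA PySem.Dict.empty).getD key PySem.Set.empty) (fun x => x) false)) := rfl

-- "ensure key" step: getD with empty default is unchanged
lemma pvEnsure_getD (d : PySem.Dict Int (PySem.Set Int)) (j k : Int) :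
    (if d.contains j then d else d.insert j PySem.Set.empty).getD k PySem.Set.empty
      = d.getD k PySem.Set.empty := by
  split_ifs with h
  · rfl
  · rw [PySem.Dict.getD_insert]
    split_ifs with hk
    · subst hk; rw [PySem.Dict.getD_of_not_contains d PySem.Set.empty (by simpa using h)]
    · rfl

lemma pvEnsure_mem_keys (d : PySem.Dict Int (PySem.Set Int)) (j k : Int) :
    k ∈ (if d.contains j then d else d.insert j PySem.Set.empty).keys ↔ k = j ∨ k ∈ d.keys := by
  split_ifs with h
  · have hj := (PySem.Dict.contains_iff_mem_keys d j).1 h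
    constructor
    · exact fun hk => Or.inr hk
    · rintro (hkj | hk)
      · exact hkj ▸ hj
      · exact hk
  · exact PySem.Dict.mem_keys_insert d j k PySem.Set.empty

lemma pvEnsure_nodup (d : PySem.Dict Int (PySem.Set Int)) (j : Int) (h : d.keys.Nodup) :
    (if d.contains j then d else d.insert j PySem.Set.empty).keys.Nodup := by
  split_ifs
  · exact h
  · exact PySem.Dict.nodup_keys_insert _ _ _ h

lemma pvStepA_getD_mem (d : PySem.Dict Int (PySem.Set Int)) (p : Int × Int) (k x : Int) :
    x ∈ (pvStepA d p).getD k PySem.Set.empty ↔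
      x ∈ d.getD k PySem.Set.empty ∨ (k = p.1 ∧ x = p.2) ∨ (k = p.2 ∧ x = p.1) := by
  unfold pvStepA
  simp only [PySem.Dict.getD_insert, pvEnsure_getD]
  split_ifs <;> simp_all [PySem.Set.mem_add]

lemma pvStepA_mem_keys (d : PySem.Dict Int (PySem.Set Int)) (p : Int × Int) (k : Int) :
    k ∈ (pvStepA d p).keys ↔ k ∈ d.keys ∨ k = p.1 ∨ k = p.2 := by
  unfold pvStepA
  simp only [PySem.Dict.mem_keys_insert, pvEnsure_mem_keys]
  tauto

lemma pvStepA_nodup_keys (d : PySem.Dict Int (PySem.Set Int)) (p : Int × Int)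
    (h : d.keys.Nodup) : (pvStepA d p).keys.Nodup := by
  unfold pvStepA
  exact PySem.Dict.nodup_keys_insert _ _ _ (PySem.Dict.nodup_keys_insert _ _ _
    (pvEnsure_nodup _ _ (pvEnsure_nodup _ _ h)))

lemma pvStepA_getD_nodup (d : PySem.Dict Int (PySem.Set Int)) (p : Int × Int)
    (h : ∀ k, (d.getD k PySem.Set.empty).Nodup) (k : Int) :
    ((pvStepA d p).getD k PySem.Set.empty).Nodup := by
  unfold pvStepA
  simp only [PySem.Dict.getD_insert, pvEnsure_getD]
  split_ifs <;>
    first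
      | exact h _
      | exact PySem.Set.nodup_add _ _ (h _)
      | exact PySem.Set.nodup_add _ _ (PySem.Set.nodup_add _ _ (h _))

lemma pvFoldA_getD_mem (l : List (Int × Int)) (d : PySem.Dict Int (PySem.Set Int)) (k x : Int) :
    x ∈ (l.foldl pvStepA d).getD k PySem.Set.empty ↔
      x ∈ d.getD k PySem.Set.empty ∨ ∃ p ∈ l, (k = p.1 ∧ x = p.2) ∨ (k = p.2 ∧ x = p.1) := by
  induction l generalizing d with
  | nil => simp
  | cons q t ih =>
    simp only [List.foldl_cons, ih, pvStepA_getD_mem, List.mem_cons]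
    constructor
    · rintro ((h | h) | ⟨p, hp, hh⟩)
      · exact Or.inl h
      · exact Or.inr ⟨q, Or.inl rfl, h⟩
      · exact Or.inr ⟨p, Or.inr hp, hh⟩
    · rintro (h | ⟨p, (rfl | hp), hh⟩)
      · exact Or.inl (Or.inl h)
      · exact Or.inl (Or.inr hh)
      · exact Or.inr ⟨p, hp, hh⟩

lemma pvFoldA_mem_keys (l : List (Int × Int)) (d : PySem.Dict Int (PySem.Set Int)) (k : Int) :
    k ∈ (l.foldl pvStepA d).keys ↔ k ∈ d.keys ∨ ∃ p ∈ l, k = p.1 ∨ k = p.2 := by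
  induction l generalizing d with
  | nil => simp
  | cons q t ih =>
    simp only [List.foldl_cons, ih, pvStepA_mem_keys, List.mem_cons]
    constructor
    · rintro ((h | h) | ⟨p, hp, hh⟩)
      · exact Or.inl h
      · exact Or.inr ⟨q, Or.inl rfl, h⟩
      · exact Or.inr ⟨p, Or.inr hp, hh⟩
    · rintro (h | ⟨p, (rfl | hp), hh⟩)
      · exact Or.inl (Or.inl h)
      · exact Or.inl (Or.inr hh)
      · exact Or.inr ⟨p, hp, hh⟩

lemma pvFoldA_nodup_keys (l : List (Int × Int)) (d : PySem.Dict Int (PySem.Set Int))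
    (h : d.keys.Nodup) : (l.foldl pvStepA d).keys.Nodup := by
  induction l generalizing d with
  | nil => exact h
  | cons q t ih => exact ih _ (pvStepA_nodup_keys _ _ h)

lemma pvFoldA_getD_nodup (l : List (Int × Int)) (d : PySem.Dict Int (PySem.Set Int))
    (h : ∀ k, (d.getD k PySem.Set.empty).Nodup) (k : Int) :
    ((l.foldl pvStepA d).getD k PySem.Set.empty).Nodup := by
  induction l generalizing d with
  | nil => exact h k
  | cons q t ih => exact ih _ (pvStepA_getD_nodup _ _ h)

lemma pvSorted_eq_of_mem_iff (xs ys : List Int) (hx : xs.Nodup) (hy : ys.Nodup)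
    (h : ∀ a, a ∈ xs ↔ a ∈ ys) :
    PySem.List.sorted xs (fun x => x) false = PySem.List.sorted ys (fun x => x) false := by
  exact (PySem.List.sorted_id_eq_sorted_id_iff_perm xs ys).2 ((List.perm_ext_iff_of_nodup hx hy).2 h)

-- ===== VERDICT (by name: the statement is the Claim_ definition above) =====
theorem find_all_conflict_links_spec : Claim_equal_find_all_conflict_links := by
  intro conflicts service_pool _
  unfold Spec_find_all_conflict_links
  rw [pvA_eq]
  unfold find_all_conflict_links_alt
  have hkeys : PySem.List.sorted (conflicts.foldl pvStepA PySem.Dict.empty).keys (fun x => x) false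
      = PySem.List.sorted (PySem.Set.ofList (conflicts.flatMap (fun pair => [pair.1, pair.2]))) (fun x => x) false := by
    apply pvSorted_eq_of_mem_iff
    · exact pvFoldA_nodup_keys _ _ PySem.Dict.nodup_keys_empty
    · exact PySem.Set.nodup_ofList _
    · intro a
      rw [pvFoldA_mem_keys, PySem.Set.mem_ofList]
      simp [PySem.Dict.keys_empty, List.mem_flatMap]
  rw [hkeys]
  apply List.map_congr_left
  intro k _
  refine congrArg (fun l => (k, l)) ?_
  apply pvSorted_eq_of_mem_iff
  · exact pvFoldA_getD_nodup _ _ (by simp) k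
  · exact PySem.Set.nodup_union _ _ (PySem.Set.nodup_ofList _)
  · intro x
    rw [pvFoldA_getD_mem, PySem.Set.mem_union]
    simp only [PySem.Dict.getD_empty, PySem.Set.mem_ofList, List.mem_map, List.mem_filter,
      beq_iff_eq, PySem.Set.empty, List.not_mem_nil, false_or]
    constructor
    · rintro ⟨p, hp, (⟨rfl, rfl⟩ | ⟨rfl, rfl⟩)⟩
      · exact Or.inl ⟨p, ⟨hp, rfl⟩, rfl⟩
      · exact Or.inr ⟨p, ⟨hp, rfl⟩, rfl⟩
    · rintro (⟨p, ⟨hp, h1⟩, rfl⟩ | ⟨p, ⟨hp, h1⟩, rfl⟩)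
      · exact ⟨p, hp, Or.inl ⟨h1.symm, rfl⟩⟩
      · exact ⟨p, hp, Or.inr ⟨h1.symm, rfl⟩⟩
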